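-- pv_equiv track=rewrite | github.com/iknoom/Problem_Solving | Programmers/monthly code challenge s2/Round 1/C.py | solution
-- ===== SOURCE A (Python) =====
-- def dfs(u, a, adj, vst):
--     ret = 0
--     vst[u] = True
--     for v in adj[u]:
--         if vst[v]: continue
--         ret += dfs(v, a, adj, vst)
--         ret += abs(a[v])
--         a[u] += a[v]
--     return ret
--
-- def solution(a, edges):
--     N = len(a)
--     adj = [[] for _ in range(N)]
--     vst = [False] * N
--     for u, v in edges:
--         adj[u].append(v)
--         adj[v].append(u)
--     answer = dfs(0, a, adj, vst)
--     if a[0] == 0: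
--         return answer
--     else:
--         return -1
-- ===== SOURCE B (Python) =====
-- def solution(a, edges):
--     # Iterative two-phase rewrite: an explicit-stack DFS first records, for the
--     # component of node 0, the post-order list of (node, parent) pairs; a second
--     # pass then folds that list, adding abs(subtree sum) and pushing each sum
--     # into the parent (mutating a in place exactly as the original does).
--     N = len(a)
--     adj = [[] for _ in range(N)]
--     for u, v in edges:
--         adj[u].append(v)
--         adj[v].append(u)
--     vst = [False] * N
--     vst[0] = True
--     ops = []
--     stack = [(0, 0, 0)]  # (node, parent, next child index); root's parent unused
--     while stack:
--         u, p, i = stack[-1]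
--         if i == len(adj[u]):
--             stack.pop()
--             if stack:
--                 ops.append((u, p))
--         else:
--             stack[-1] = (u, p, i + 1)
--             v = adj[u][i]
--             if not vst[v]:
--                 vst[v] = True
--                 stack.append((v, u, 0))
--     answer = 0
--     for v, p in ops:
--         answer += abs(a[v])
--         a[p] += a[v]
--     return answer if a[0] == 0 else -1
-- ===== Notes on version B (the rewrite author's own statement) =====
-- stated objective: alternative
-- what changed: The recursive DFS that accumulates subtree sums on the call stack is replaced by an iterative two-phase algorithm: an explicit-stack traversal first records the post-order (node, parent) pairs of the component of node 0, and a second flat loop folds that list, adding abs(subtree sum) and pushing each sum into its parent; this avoids Python recursion (no RecursionError on deep trees) at the same O(N+E) cost.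
import Mathlib
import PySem

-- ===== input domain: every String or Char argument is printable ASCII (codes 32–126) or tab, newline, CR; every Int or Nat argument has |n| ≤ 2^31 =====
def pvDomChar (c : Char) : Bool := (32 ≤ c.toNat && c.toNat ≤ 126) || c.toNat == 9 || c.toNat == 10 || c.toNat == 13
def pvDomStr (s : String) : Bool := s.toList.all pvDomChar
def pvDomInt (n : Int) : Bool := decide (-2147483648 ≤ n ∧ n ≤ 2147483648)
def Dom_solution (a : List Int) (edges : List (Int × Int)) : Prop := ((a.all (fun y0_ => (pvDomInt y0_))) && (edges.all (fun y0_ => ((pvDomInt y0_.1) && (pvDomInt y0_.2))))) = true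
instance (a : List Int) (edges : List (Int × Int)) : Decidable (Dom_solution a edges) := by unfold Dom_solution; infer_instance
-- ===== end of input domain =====

-- B replaces the recursive DFS by an explicit-stack post-order traversal plus a flat
-- fold over the recorded (node, parent) pairs (objective: alternative — no Python
-- recursion). Both Pythons mutate `a` identically in place; equivalence proved here
-- is about the return value.

-- ===== PORT A =====
-- Python indexing normalisation used when the edge endpoints are stored into the
-- adjacency lists (adj[u].append(v)); exact Python index semantics on ints.
def pyIdxN (n : Nat) (i : Int) : Option Nat :=
  if 0 ≤ i ∧ i < (n : Int) then some i.toNat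
  else if -(n : Int) ≤ i ∧ i < 0 then some (i + n).toNat
  else none

-- shared by both ports: both Pythons build the adjacency lists with the same two
-- appends per edge; `none` = IndexError (an endpoint out of range), excluded by Pre_.
def buildAdj (n : Nat) (adj : List (List Nat)) : List (Int × Int) → Option (List (List Nat))
  | [] => some adj
  | (u, v) :: es =>
    match pyIdxN n u, pyIdxN n v with
    | some iu, some iv =>
      let adj1 := adj.set iu (adj.getD iu [] ++ [iv])
      let adj2 := adj1.set iv (adj1.getD iv [] ++ [iu])
      buildAdj n adj2 es
    | _, _ => none

mutual
-- literal port of Python's recursive dfs; the fuel only bounds the recursion depth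
-- (the caller passes a.length, which is proved/always sufficient: depth ≤ #unvisited)
def dfsA (adj : List (List Nat)) (fuel : Nat) (u : Nat) (a : List Int) (vst : List Bool) :
    Int × List Int × List Bool :=
  match fuel with
  | 0 => (0, a, vst)
  | f + 1 => goA adj f u (adj.getD u []) 0 a (vst.set u true)
  termination_by (fuel, 0)

-- the `for v in adj[u]` loop of dfs
def goA (adj : List (List Nat)) (f : Nat) (u : Nat) (cs : List Nat) (ret : Int)
    (a : List Int) (vst : List Bool) : Int × List Int × List Bool :=
  match cs with
  | [] => (ret, a, vst)
  | v :: vs =>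
    if vst.getD v false then goA adj f u vs ret a vst
    else
      let r := dfsA adj f v a vst
      let av := r.2.1.getD v 0
      goA adj f u vs (ret + r.1 + |av|) (r.2.1.set u (r.2.1.getD u 0 + av)) r.2.2
  termination_by (f, cs.length + 1)
end

def solution (a : List Int) (edges : List (Int × Int)) : Int :=
  let N := a.length
  match buildAdj N (List.replicate N []) edges with
  | none => 0  -- IndexError in Python; outside Pre_
  | some adj =>
    let r := dfsA adj N 0 a (List.replicate N false)
    if r.2.1.getD 0 0 = 0 then r.1 else -1

-- ===== PORT B =====
-- phase 2 of Source B: one step of `answer += abs(a[v]); a[p] += a[v]`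
def stepFold (s : Int × List Int) (op : Nat × Nat) : Int × List Int :=
  let av := s.2.getD op.1 0
  (s.1 + |av|, s.2.set op.2 (s.2.getD op.2 0 + av))

-- phase 1 of Source B: the explicit-stack while-loop; frames are (node, parent, next
-- child index); fuel is a totality guard only (the caller's fuel is proved enough)
def mrun (adj : List (List Nat)) : Nat → List (Nat × Nat × Nat) → List Bool →
    List (Nat × Nat) → List Bool × List (Nat × Nat)
  | 0, _, vst, ops => (vst, ops)
  | _ + 1, [], vst, ops => (vst, ops)
  | fuel + 1, (u, p, i) :: rest, vst, ops =>
    let cs := adj.getD u []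
    if i = cs.length then
      mrun adj fuel rest vst (if rest = [] then ops else ops ++ [(u, p)])
    else
      let v := cs.getD i 0
      if vst.getD v false then mrun adj fuel ((u, p, i + 1) :: rest) vst ops
      else mrun adj fuel ((v, u, 0) :: (u, p, i + 1) :: rest) (vst.set v true) ops

def solution_alt (a : List Int) (edges : List (Int × Int)) : Int :=
  let N := a.length
  match buildAdj N (List.replicate N []) edges with
  | none => 0  -- IndexError in Python; outside Pre_
  | some adj =>
    let r := mrun adj (N * (1 + 2 * edges.length)) [(0, 0, 0)]
      ((List.replicate N false).set 0 true) []
    let s := r.2.foldl stepFold (0, a)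
    if s.2.getD 0 0 = 0 then s.1 else -1

-- ===== PRECONDITION & SPEC =====
-- Pre_ excludes exactly the inputs where Python A raises an IndexError: an empty `a`
-- (dfs(0) indexes adj[0]) or an edge endpoint outside [-len(a), len(a)).
def Pre_solution (a : List Int) (edges : List (Int × Int)) : Prop :=
  a ≠ [] ∧ ∀ e ∈ edges,
    (-(a.length : Int) ≤ e.1 ∧ e.1 < (a.length : Int)) ∧
    (-(a.length : Int) ≤ e.2 ∧ e.2 < (a.length : Int))
instance (a : List Int) (edges : List (Int × Int)) : Decidable (Pre_solution a edges) := by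
  unfold Pre_solution; infer_instance

def pvWitness_solution : List Int × (List (Int × Int)) := ([3, -1, -2], [(0, 1), (1, 2)])

def Spec_solution (a : List Int) (edges : List (Int × Int)) (out : Int) : Prop := out = solution_alt a edges
instance (a : List Int) (edges : List (Int × Int)) (out : Int) : Decidable (Spec_solution a edges out) := by unfold Spec_solution; infer_instance

-- ===== CLAIM (what is proved, stated in full; the proofs are below) =====
def Claim_equal_solution : Prop := ∀ (a : List Int) (edges : List (Int × Int)), Dom_solution a edges → Pre_solution a edges → Spec_solution a edges (solution a edges)

-- ===== LEMMAS AND PROOFS =====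

-- intermediate spec: recursive traversal recording the post-order (node, parent) pairs
mutual
def dfsP (adj : List (List Nat)) (fuel : Nat) (u : Nat) (vst : List Bool)
    (ops : List (Nat × Nat)) : List Bool × List (Nat × Nat) :=
  match fuel with
  | 0 => (vst, ops)
  | f + 1 => goP adj f (adj.getD u []) u (vst.set u true) ops
  termination_by (fuel, 0)

def goP (adj : List (List Nat)) (f : Nat) (cs : List Nat) (u : Nat) (vst : List Bool)
    (ops : List (Nat × Nat)) : List Bool × List (Nat × Nat) :=
  match cs with
  | [] => (vst, ops)
  | v :: vs =>
    if vst.getD v false then goP adj f vs u vst ops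
    else
      let r := dfsP adj f v vst ops
      goP adj f vs u r.1 (r.2 ++ [(v, u)])
  termination_by (f, cs.length + 1)
end

def countF (vst : List Bool) : Nat := vst.count false

def adjOK (n : Nat) (adj : List (List Nat)) : Prop := ∀ l ∈ adj, ∀ x ∈ l, x < n

def totL (adj : List (List Nat)) : Nat := (adj.map List.length).sum

def slots (adj : List (List Nat)) (stack : List (Nat × Nat × Nat)) : Nat :=
  (stack.map (fun fr => (adj.getD fr.1 []).length - fr.2.2)).sum

def phi (adj : List (List Nat)) (stack : List (Nat × Nat × Nat)) (vst : List Bool) : Nat :=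
  stack.length + slots adj stack + countF vst * (1 + totL adj)

def stackOK (adj : List (List Nat)) (n : Nat) (stack : List (Nat × Nat × Nat)) : Prop :=
  ∀ fr ∈ stack, fr.1 < n ∧ fr.2.2 ≤ (adj.getD fr.1 []).length

theorem countF_le (vst : List Bool) : countF vst ≤ vst.length := List.count_le_length

theorem countF_set_true_le (vst : List Bool) (u : Nat) :
    countF (vst.set u true) ≤ countF vst := by
  induction vst generalizing u with
  | nil => simp [countF]
  | cons b t ih =>
    cases u with
    | zero => cases b <;> simp [countF, List.count_cons]
    | succ m => simp [countF, List.count_cons] at *; have := ih m; omega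

theorem countF_set_true (vst : List Bool) (u : Nat) (hu : u < vst.length)
    (hf : vst.getD u false = false) : countF (vst.set u true) + 1 = countF vst := by
  induction vst generalizing u with
  | nil => simp at hu
  | cons b t ih =>
    cases u with
    | zero => simp at hf; subst hf; simp [countF, List.count_cons]
    | succ m =>
      simp at hu hf
      have := ih m hu hf
      simp [countF, List.count_cons] at *; omega

theorem countF_zero_getD (vst : List Bool) (v : Nat) (hv : v < vst.length)
    (h0 : countF vst = 0) : vst.getD v false = true := by
  induction vst generalizing v with
  | nil => simp at hv
  | cons b t ih =>
    have h0' : countF t = 0 := by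
      cases b <;> simp [countF, List.count_cons] at h0 ⊢ <;> omega
    cases v with
    | zero =>
      cases b
      · exfalso; simp [countF, List.count_cons] at h0
      · rfl
    | succ m => simp at hv ⊢; exact ih m (by omega) h0'


theorem goP_inv_of (adj : List (List Nat)) (f : Nat)
    (hP : ∀ u (vst : List Bool) ops, ((dfsP adj f u vst ops).1.length = vst.length ∧ countF (dfsP adj f u vst ops).1 ≤ countF vst)) :
    ∀ cs u (vst : List Bool) ops, ((goP adj f cs u vst ops).1.length = vst.length ∧ countF (goP adj f cs u vst ops).1 ≤ countF vst) := by
  intro cs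
  induction cs with
  | nil => intro u vst ops; rw [goP]; exact ⟨rfl, le_refl _⟩
  | cons v vs ih =>
    intro u vst ops
    rw [goP]
    by_cases hv : vst.getD v false = true
    · simp only [hv, if_true]; exact ih u vst ops
    · simp only [hv, Bool.false_eq_true, if_false]
      obtain ⟨h1, h2⟩ := hP v vst ops
      obtain ⟨h3, h4⟩ := ih u (dfsP adj f v vst ops).1 ((dfsP adj f v vst ops).2 ++ [(v, u)])
      exact ⟨h3.trans h1, h4.trans h2⟩

theorem dfsP_inv : ∀ (fuel : Nat) (adj : List (List Nat)),
    ∀ u (vst : List Bool) ops, ((dfsP adj fuel u vst ops).1.length = vst.length ∧ countF (dfsP adj fuel u vst ops).1 ≤ countF vst) := by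
  intro fuel
  induction fuel with
  | zero => intro adj u vst ops; rw [dfsP]; exact ⟨rfl, le_refl _⟩
  | succ f ihf =>
    intro adj u vst ops
    rw [dfsP]
    obtain ⟨h1, h2⟩ := goP_inv_of adj f (ihf adj) (adj.getD u []) u (vst.set u true) ops
    exact ⟨by rw [h1]; simp, h2.trans (countF_set_true_le vst u)⟩

theorem goP_inv (adj : List (List Nat)) (f : Nat) :
    ∀ cs u (vst : List Bool) ops, ((goP adj f cs u vst ops).1.length = vst.length ∧ countF (goP adj f cs u vst ops).1 ≤ countF vst) :=
  goP_inv_of adj f (dfsP_inv f adj)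

theorem goP_acc_of (adj : List (List Nat)) (f : Nat)
    (hP : ∀ u (vst : List Bool) ops, dfsP adj f u vst ops =
      ((dfsP adj f u vst []).1, ops ++ (dfsP adj f u vst []).2)) :
    ∀ cs u (vst : List Bool) ops, goP adj f cs u vst ops =
      ((goP adj f cs u vst []).1, ops ++ (goP adj f cs u vst []).2) := by
  intro cs
  induction cs with
  | nil => intro u vst ops; rw [goP, goP]; simp
  | cons v vs ih =>
    intro u vst ops
    rw [goP]
    by_cases hv : vst.getD v false = true
    · simp only [hv, if_true]
      rw [ih u vst ops]
      conv_rhs => rw [goP]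
      simp only [hv, if_true]
    · simp only [hv, Bool.false_eq_true, if_false]
      rw [hP v vst ops]
      rw [ih u (dfsP adj f v vst []).1 ((ops ++ (dfsP adj f v vst []).2) ++ [(v, u)])]
      conv_rhs => rw [goP]
      simp only [hv, Bool.false_eq_true, if_false]
      rw [ih u (dfsP adj f v vst []).1 ((dfsP adj f v vst []).2 ++ [(v, u)])]
      simp

theorem dfsP_acc : ∀ (fuel : Nat) (adj : List (List Nat)),
    ∀ u (vst : List Bool) ops, dfsP adj fuel u vst ops =
      ((dfsP adj fuel u vst []).1, ops ++ (dfsP adj fuel u vst []).2) := by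
  intro fuel
  induction fuel with
  | zero => intro adj u vst ops; rw [dfsP, dfsP]; simp
  | succ f ihf =>
    intro adj u vst ops
    rw [dfsP]
    conv_rhs => rw [dfsP]
    exact goP_acc_of adj f (ihf adj) (adj.getD u []) u (vst.set u true) ops

theorem goP_acc (adj : List (List Nat)) (f : Nat) :
    ∀ cs u (vst : List Bool) ops, goP adj f cs u vst ops =
      ((goP adj f cs u vst []).1, ops ++ (goP adj f cs u vst []).2) :=
  goP_acc_of adj f (dfsP_acc f adj)

theorem fold_add (ops : List (Nat × Nat)) :
    ∀ (x : Int) (a : List Int),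
      ops.foldl stepFold (x, a) =
        (x + (ops.foldl stepFold (0, a)).1, (ops.foldl stepFold (0, a)).2) := by
  induction ops with
  | nil => intro x a; simp
  | cons op t ih =>
    intro x a
    simp only [List.foldl_cons]
    rw [show stepFold (x, a) op = (x + |a.getD op.1 0|, a.set op.2 (a.getD op.2 0 + a.getD op.1 0)) from rfl]
    rw [show stepFold (0, a) op = (0 + |a.getD op.1 0|, a.set op.2 (a.getD op.2 0 + a.getD op.1 0)) from rfl]
    rw [ih (x + |a.getD op.1 0|), ih (0 + |a.getD op.1 0|)]
    simp only [Prod.mk.injEq]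
    exact ⟨by ring, trivial⟩

theorem goA_eq_of (adj : List (List Nat)) (f : Nat)
    (hP : ∀ u (a : List Int) (vst : List Bool), dfsA adj f u a vst =
      (((dfsP adj f u vst []).2.foldl stepFold (0, a)).1,
       ((dfsP adj f u vst []).2.foldl stepFold (0, a)).2,
       (dfsP adj f u vst []).1)) :
    ∀ cs u (ret : Int) (a : List Int) (vst : List Bool), goA adj f u cs ret a vst =
      (ret + ((goP adj f cs u vst []).2.foldl stepFold (0, a)).1,
       ((goP adj f cs u vst []).2.foldl stepFold (0, a)).2,
       (goP adj f cs u vst []).1) := by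
  intro cs
  induction cs with
  | nil => intro u ret a vst; rw [goA, goP]; simp
  | cons v vs ih =>
    intro u ret a vst
    rw [goA]
    by_cases hv : vst.getD v false = true
    · simp only [hv, if_true]
      rw [ih]
      conv_rhs => rw [goP]
      simp only [hv, if_true]
    · simp only [hv, Bool.false_eq_true, if_false]
      rw [hP v a vst]
      rw [ih]
      conv_rhs => rw [goP]
      simp only [hv, Bool.false_eq_true, if_false]
      -- notation
      set w1 := dfsP adj f v vst [] with hw1
      set s1 := (w1.2.foldl stepFold (0, a)) with hs1
      set av := s1.2.getD v 0 with hav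
      -- RHS ops list: goP f vs u w1.1 (w1.2 ++ [(v,u)]) → acc form
      rw [goP_acc adj f vs u w1.1 (w1.2 ++ [(v, u)])]
      set w2 := goP adj f vs u w1.1 [] with hw2
      rw [List.foldl_append, List.foldl_append]
      rw [show (w1.2.foldl stepFold (0,a)) = s1 from rfl]
      rw [show [(v,u)].foldl stepFold s1 = (s1.1 + |av|, s1.2.set u (s1.2.getD u 0 + av)) from rfl]
      rw [fold_add w2.2 (s1.1 + |av|) (s1.2.set u (s1.2.getD u 0 + av))]
      simp only [Prod.mk.injEq]
      exact ⟨by ring, trivial⟩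

theorem dfsA_eq_dfsP : ∀ (fuel : Nat) (adj : List (List Nat)) u (a : List Int) (vst : List Bool),
      dfsA adj fuel u a vst =
        (((dfsP adj fuel u vst []).2.foldl stepFold (0, a)).1,
         ((dfsP adj fuel u vst []).2.foldl stepFold (0, a)).2,
         (dfsP adj fuel u vst []).1) := by
  intro fuel
  induction fuel with
  | zero => intro adj u a vst; rw [dfsA, dfsP]; simp
  | succ f ihf =>
    intro adj u a vst
    rw [dfsA]
    conv_rhs => rw [dfsP]
    rw [goA_eq_of adj f (ihf adj) (adj.getD u []) u 0 a (vst.set u true)]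
    simp


theorem getD_mem_lt (n : Nat) (adj : List (List Nat)) (h : adjOK n adj) (u : Nat) :
    ∀ x ∈ adj.getD u [], x < n := by
  intro x hx
  by_cases hu : u < adj.length
  · rw [adj.getD_eq_getElem [] hu] at hx
    exact h _ (adj.getElem_mem hu) x hx
  · rw [List.getD_eq_default] at hx
    · simp at hx
    · omega

theorem goP_fuel_succ (n : Nat) (adj : List (List Nat)) (hadj : adjOK n adj) :
    ∀ fuel cs u (vst : List Bool) ops, vst.length = n → (∀ v ∈ cs, v < n) → countF vst ≤ fuel →
      goP adj fuel cs u vst ops = goP adj (fuel + 1) cs u vst ops := by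
  intro fuel
  induction fuel with
  | zero =>
    intro cs
    induction cs with
    | nil => intro u vst ops _ _ _; rw [goP, goP]
    | cons v vs ih =>
      intro u vst ops hlen hcs hcf
      have hv : vst.getD v false = true :=
        countF_zero_getD vst v (by rw [hlen]; exact hcs v (by simp)) (by omega)
      rw [goP]
      conv_rhs => rw [goP]
      simp only [hv, if_true]
      exact ih u vst ops hlen (fun x hx => hcs x (by simp [hx])) hcf
  | succ f ihf =>
    have hA : ∀ u (vst : List Bool) ops, vst.length = n → u < n → vst.getD u false = false →
        countF vst ≤ f + 1 → dfsP adj (f + 1) u vst ops = dfsP adj (f + 2) u vst ops := by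
      intro u vst ops hlen hu hf hcf
      rw [dfsP]
      conv_rhs => rw [dfsP]
      have hc1 : countF (vst.set u true) + 1 = countF vst :=
        countF_set_true vst u (by omega) hf
      exact ihf (adj.getD u []) u (vst.set u true) ops (by simp [hlen])
        (getD_mem_lt n adj hadj u) (by omega)
    intro cs
    induction cs with
    | nil => intro u vst ops _ _ _; rw [goP, goP]
    | cons v vs ih =>
      intro u vst ops hlen hcs hcf
      by_cases hv : vst.getD v false = true
      · rw [goP]
        conv_rhs => rw [goP]
        simp only [hv, if_true]
        exact ih u vst ops hlen (fun x hx => hcs x (by simp [hx])) hcf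
      · have hv' : vst.getD v false = false := by
          cases h : vst.getD v false
          · rfl
          · exact absurd h hv
        rw [goP]
        conv_rhs => rw [goP]
        simp only [hv, Bool.false_eq_true, if_false]
        rw [← hA v vst ops hlen (hcs v (by simp)) hv' hcf]
        obtain ⟨hl, hc⟩ := dfsP_inv (f + 1) adj v vst ops
        exact ih u (dfsP adj (f+1) v vst ops).1 ((dfsP adj (f+1) v vst ops).2 ++ [(v, u)])
          (by rw [hl, hlen]) (fun x hx => hcs x (by simp [hx])) (by omega)

theorem goP_fuel_ge (n : Nat) (adj : List (List Nat)) (hadj : adjOK n adj) :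
    ∀ g fuel cs u (vst : List Bool) ops, fuel ≤ g → vst.length = n → (∀ v ∈ cs, v < n) →
      countF vst ≤ fuel →
      goP adj fuel cs u vst ops = goP adj g cs u vst ops := by
  intro g fuel cs u vst ops hle hlen hcs hcf
  induction g with
  | zero => have : fuel = 0 := by omega
            subst this; rfl
  | succ m ih =>
    rcases Nat.lt_or_ge fuel (m + 1) with h | h
    · rw [ih (by omega)]
      exact goP_fuel_succ n adj hadj m cs u vst ops hlen hcs (by omega)
    · have : fuel = m + 1 := by omega
      subst this; rfl


theorem getD_len_le_totL (adj : List (List Nat)) (u : Nat) :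
    (adj.getD u []).length ≤ totL adj := by
  by_cases hu : u < adj.length
  · rw [adj.getD_eq_getElem [] hu]
    exact List.single_le_sum (by simp) _ (by simp; exact ⟨_, adj.getElem_mem hu, rfl⟩)
  · rw [List.getD_eq_default]
    · simp
    · omega

theorem mrun_nil (adj : List (List Nat)) (fuel : Nat) (vst : List Bool)
    (ops : List (Nat × Nat)) : mrun adj fuel [] vst ops = (vst, ops) := by
  cases fuel <;> rw [mrun]

theorem slots_cons (adj : List (List Nat)) (u p j : Nat) (rest : List (Nat × Nat × Nat)) :
    slots adj ((u, p, j) :: rest) = ((adj.getD u []).length - j) + slots adj rest := by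
  simp [slots]

theorem phi_cons (adj : List (List Nat)) (u p j : Nat) (rest : List (Nat × Nat × Nat)) (vst : List Bool) :
    phi adj ((u, p, j) :: rest) vst =
      1 + rest.length + (((adj.getD u []).length - j) + slots adj rest) +
        countF vst * (1 + totL adj) := by
  simp [phi, slots]; omega

theorem mrun_fuel_succ (n : Nat) (adj : List (List Nat)) (hadj : adjOK n adj) :
    ∀ fuel stack (vst : List Bool) ops, vst.length = n → stackOK adj n stack →
      phi adj stack vst ≤ fuel →
      mrun adj fuel stack vst ops = mrun adj (fuel + 1) stack vst ops := by
  intro fuel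
  induction fuel with
  | zero =>
    intro stack vst ops _ _ hphi
    have : stack = [] := by
      cases stack with
      | nil => rfl
      | cons fr t => exfalso; simp [phi] at hphi
    subst this
    rw [mrun_nil, mrun_nil]
  | succ f ihf =>
    intro stack vst ops hlen hstk hphi
    cases stack with
    | nil => rw [mrun_nil, mrun_nil]
    | cons fr rest =>
      obtain ⟨u, p, i⟩ := fr
      obtain ⟨hu, hile⟩ := hstk (u, p, i) (by simp)
      simp only at hu hile
      rw [mrun]
      conv_rhs => rw [mrun]
      simp only
      by_cases hi2 : i = (adj.getD u []).length
      · simp only [hi2, if_pos rfl]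
        apply ihf rest vst _ hlen (fun fr h => hstk fr (by simp [h]))
        unfold phi at hphi ⊢
        rw [slots_cons] at hphi
        simp only [List.length_cons] at hphi
        omega
      · simp only [if_neg hi2]
        have hilt : i < (adj.getD u []).length := by omega
        have hv : (adj.getD u []).getD i 0 < n :=
          getD_mem_lt n adj hadj u _ (by
            rw [List.getD_eq_getElem _ _ hilt]; exact List.getElem_mem hilt)
        set v := (adj.getD u []).getD i 0 with hvdef
        by_cases hvst : vst.getD v false = true
        · simp only [hvst, if_true]
          apply ihf _ vst _ hlen
          · intro fr h
            rcases List.mem_cons.mp h with h | h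
            · subst h; exact ⟨hu, by show i + 1 ≤ (adj.getD u []).length; omega⟩
            · exact hstk fr (by simp [h])
          · simp [phi, slots] at hphi hilt ⊢
            omega
        · simp only [hvst, Bool.false_eq_true, if_false]
          have hvf : vst.getD v false = false := by
            cases h : vst.getD v false
            · rfl
            · exact absurd h hvst
          have hc1 : countF (vst.set v true) + 1 = countF vst :=
            countF_set_true vst v (by omega) hvf
          apply ihf _ (vst.set v true) _ (by simp [hlen])
          · intro fr h
            rcases List.mem_cons.mp h with h | h
            · subst h; exact ⟨hv, by show 0 ≤ (adj.getD v []).length; omega⟩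
            · rcases List.mem_cons.mp h with h | h
              · subst h; exact ⟨hu, by show i + 1 ≤ (adj.getD u []).length; omega⟩
              · exact hstk fr (by simp [h])
          · have hlv : (adj.getD v []).length ≤ totL adj := getD_len_le_totL adj v
            have hmul : countF vst * (1 + totL adj) =
                countF (vst.set v true) * (1 + totL adj) + (1 + totL adj) := by
              rw [← hc1]; ring
            simp [phi, slots] at hphi hilt hlv hmul ⊢
            omega

theorem mrun_fuel_ge (n : Nat) (adj : List (List Nat)) (hadj : adjOK n adj) :
    ∀ g fuel stack (vst : List Bool) ops, fuel ≤ g → vst.length = n → stackOK adj n stack →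
      phi adj stack vst ≤ fuel →
      mrun adj fuel stack vst ops = mrun adj g stack vst ops := by
  intro g fuel stack vst ops hle hlen hstk hphi
  induction g with
  | zero => have : fuel = 0 := by omega
            subst this; rfl
  | succ m ih =>
    rcases Nat.lt_or_ge fuel (m + 1) with h | h
    · rw [ih (by omega)]
      exact mrun_fuel_succ n adj hadj m stack vst ops hlen hstk (by omega)
    · have : fuel = m + 1 := by omega
      subst this; rfl

theorem mrun_key (n : Nat) (adj : List (List Nat)) (hadj : adjOK n adj) :
    ∀ fuel u p i rest (vst : List Bool) ops, vst.length = n → u < n →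
      i ≤ (adj.getD u []).length → stackOK adj n rest →
      phi adj ((u, p, i) :: rest) vst ≤ fuel →
      mrun adj fuel ((u, p, i) :: rest) vst ops =
        mrun adj fuel rest (goP adj n (List.drop i (adj.getD u [])) u vst ops).1
          (if rest = [] then (goP adj n (List.drop i (adj.getD u [])) u vst ops).2
           else (goP adj n (List.drop i (adj.getD u [])) u vst ops).2 ++ [(u, p)]) := by
  intro fuel
  induction fuel using Nat.strong_induction_on with
  | _ fuel IH =>
  intro u p i rest vst ops hlen hu hile hstk hphi
  have hfuel1 : 1 ≤ fuel := by
    have : 1 ≤ phi adj ((u, p, i) :: rest) vst := by simp [phi]; omega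
    omega
  obtain ⟨f, rfl⟩ : ∃ f, fuel = f + 1 := ⟨fuel - 1, by omega⟩
  rw [mrun]
  simp only
  by_cases hi2 : i = (adj.getD u []).length
  · simp only [hi2]
    rw [if_pos trivial, List.drop_length]
    rw [goP]
    exact mrun_fuel_ge n adj hadj (f + 1) f rest vst _ (by omega) hlen hstk (by
      rw [phi_cons] at hphi
      show rest.length + slots adj rest + countF vst * (1 + totL adj) ≤ f
      omega)
  · simp only [if_neg hi2]
    have hilt : i < (adj.getD u []).length := by omega
    have hv : (adj.getD u []).getD i 0 < n :=
      getD_mem_lt n adj hadj u _ (by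
        rw [List.getD_eq_getElem _ _ hilt]; exact List.getElem_mem hilt)
    have hdrop : List.drop i (adj.getD u []) =
        (adj.getD u []).getD i 0 :: List.drop (i + 1) (adj.getD u []) := by
      rw [List.getD_eq_getElem _ _ hilt]
      exact List.drop_eq_getElem_cons hilt
    set v := (adj.getD u []).getD i 0 with hvdef
    by_cases hvst : vst.getD v false = true
    · simp only [hvst, if_true]
      rw [hdrop, goP]
      simp only [hvst, if_true]
      rw [IH f (by omega) u p (i + 1) rest vst ops hlen hu (by omega) hstk (by
        rw [phi_cons] at hphi ⊢; omega)]
      apply mrun_fuel_ge n adj hadj (f + 1) f rest _ _ (by omega)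
        ((goP_inv adj n _ u vst ops).1.trans hlen) hstk
      have hc := (goP_inv adj n (List.drop (i + 1) (adj.getD u [])) u vst ops).2
      have hq : countF (goP adj n (List.drop (i + 1) (adj.getD u [])) u vst ops).1 * (1 + totL adj)
          ≤ countF vst * (1 + totL adj) := Nat.mul_le_mul_right _ hc
      rw [phi_cons] at hphi
      show rest.length + slots adj rest +
        countF (goP adj n (List.drop (i + 1) (adj.getD u [])) u vst ops).1 * (1 + totL adj) ≤ f
      omega
    · simp only [hvst, Bool.false_eq_true, if_false]
      have hvf : vst.getD v false = false := by
        cases h : vst.getD v false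
        · rfl
        · exact absurd h hvst
      have hc1 : countF (vst.set v true) + 1 = countF vst :=
        countF_set_true vst v (by omega) hvf
      have hlv : (adj.getD v []).length ≤ totL adj := getD_len_le_totL adj v
      have hmul : countF vst * (1 + totL adj) =
          countF (vst.set v true) * (1 + totL adj) + (1 + totL adj) := by
        rw [← hc1]; ring
      -- step 1: run the pushed frame (v,u,0)
      rw [IH f (by omega) v u 0 ((u, p, i + 1) :: rest) (vst.set v true) ops
        (by simp [hlen]) hv (by omega)
        (by intro fr hfr
            rcases List.mem_cons.mp hfr with h | h
            · subst h; exact ⟨hu, by show i + 1 ≤ (adj.getD u []).length; omega⟩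
            · exact hstk fr (by simp [h]))
        (by rw [phi_cons, slots_cons]
            rw [phi_cons] at hphi
            simp only [List.length_cons]
            omega)]
      simp only [List.drop_zero, if_neg (List.cons_ne_nil _ _)]
      -- step 2: run the advanced frame (u,p,i+1)
      set Y := goP adj n (adj.getD v []) v (vst.set v true) ops with hY
      have hYlen : Y.1.length = n := by
        rw [hY]; exact ((goP_inv adj n _ v (vst.set v true) ops).1).trans (by simp [hlen])
      have hYc : countF Y.1 ≤ countF (vst.set v true) :=
        (goP_inv adj n _ v (vst.set v true) ops).2
      have hYq : countF Y.1 * (1 + totL adj) ≤ countF (vst.set v true) * (1 + totL adj) :=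
        Nat.mul_le_mul_right _ hYc
      rw [IH f (by omega) u p (i + 1) rest Y.1 (Y.2 ++ [(v, u)]) hYlen hu (by omega) hstk (by
        rw [phi_cons] at hphi ⊢; omega)]
      -- identify the machine's visit of v with dfsP at fuel n
      obtain ⟨m, hm⟩ : ∃ m, n = m + 1 := ⟨n - 1, by omega⟩
      have hdfs : dfsP adj n v vst ops = Y := by
        rw [hY, hm, dfsP]
        apply goP_fuel_ge n adj hadj (m + 1) m _ v _ ops (by omega) (by simp [hlen])
          (getD_mem_lt n adj hadj v)
        have := countF_le vst
        omega
      rw [hdrop]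
      conv_rhs => rw [goP]
      simp only [hvst, Bool.false_eq_true, if_false]
      rw [hdfs]
      -- align the continuation fuel
      set Z := goP adj n (List.drop (i + 1) (adj.getD u [])) u Y.1 (Y.2 ++ [(v, u)]) with hZ
      have hZlen : Z.1.length = n := by
        rw [hZ]; exact ((goP_inv adj n _ u Y.1 _).1).trans hYlen
      have hZc : countF Z.1 ≤ countF Y.1 := (goP_inv adj n _ u Y.1 _).2
      apply mrun_fuel_ge n adj hadj (f + 1) f rest Z.1 _ (by omega) hZlen hstk
      have hZq : countF Z.1 * (1 + totL adj) ≤ countF (vst.set v true) * (1 + totL adj) :=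
        Nat.mul_le_mul_right _ (hZc.trans hYc)
      rw [phi_cons] at hphi
      show rest.length + slots adj rest + countF Z.1 * (1 + totL adj) ≤ f
      omega


theorem pyIdxN_lt (n : Nat) (i : Int) (k : Nat) (h : pyIdxN n i = some k) : k < n := by
  unfold pyIdxN at h
  split_ifs at h with h1 h2
  · injection h with h'; omega
  · injection h with h'; omega

theorem pyIdxN_some (n : Nat) (i : Int) (h1 : -(n : Int) ≤ i) (h2 : i < (n : Int)) :
    ∃ k, pyIdxN n i = some k := by
  unfold pyIdxN
  split_ifs with ha hb
  · exact ⟨_, rfl⟩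
  · exact ⟨_, rfl⟩
  · omega

theorem buildAdj_some (n : Nat) :
    ∀ es (adj0 : List (List Nat)),
      (∀ e ∈ es, (-(n : Int) ≤ e.1 ∧ e.1 < (n : Int)) ∧ (-(n : Int) ≤ e.2 ∧ e.2 < (n : Int))) →
      ∃ adj, buildAdj n adj0 es = some adj := by
  intro es
  induction es with
  | nil => intro adj0 _; exact ⟨adj0, rfl⟩
  | cons e es ih =>
    intro adj0 hok
    obtain ⟨u, v⟩ := e
    obtain ⟨⟨hu1, hu2⟩, hv1, hv2⟩ := hok (u, v) (by simp)
    obtain ⟨iu, hiu⟩ := pyIdxN_some n u hu1 hu2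
    obtain ⟨iv, hiv⟩ := pyIdxN_some n v hv1 hv2
    obtain ⟨adj, hadj⟩ := ih _ (fun e he => hok e (by simp [he]))
    exact ⟨adj, by rw [buildAdj, hiu, hiv]; exact hadj⟩

theorem totL_set_append :
    ∀ (adj : List (List Nat)) (i : Nat) (x : Nat), i < adj.length →
      totL (adj.set i (adj.getD i [] ++ [x])) = totL adj + 1 := by
  intro adj
  induction adj with
  | nil => intro i x h; simp at h
  | cons l t ih =>
    intro i x h
    cases i with
    | zero => simp [totL]; omega
    | succ m =>
      simp at h
      have := ih m x h
      simp [totL] at this ⊢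
      omega

theorem len_set (adj : List (List Nat)) (i : Nat) (x : List Nat) :
    (adj.set i x).length = adj.length := by simp

theorem adjOK_set_append (n : Nat) (adj : List (List Nat)) (hok : adjOK n adj)
    (i : Nat) (x : Nat) (hx : x < n) : adjOK n (adj.set i (adj.getD i [] ++ [x])) := by
  intro l hl y hy
  rcases List.mem_or_eq_of_mem_set hl with h | h
  · exact hok l h y hy
  · subst h
    rcases List.mem_append.mp hy with h | h
    · exact getD_mem_lt n adj hok i y h
    · simp at h; omega

theorem buildAdj_props (n : Nat) :
    ∀ es (adj0 adj : List (List Nat)), buildAdj n adj0 es = some adj →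
      adj0.length = n → adjOK n adj0 →
      adj.length = n ∧ adjOK n adj ∧ totL adj = totL adj0 + 2 * es.length := by
  intro es
  induction es with
  | nil =>
    intro adj0 adj h hlen hok
    rw [buildAdj] at h
    injection h with h'
    subst h'
    exact ⟨hlen, hok, by simp⟩
  | cons e es ih =>
    intro adj0 adj h hlen hok
    obtain ⟨u, v⟩ := e
    rw [buildAdj] at h
    cases hiu : pyIdxN n u with
    | none => rw [hiu] at h; simp at h
    | some iu =>
      cases hiv : pyIdxN n v with
      | none => rw [hiu, hiv] at h; simp at h
      | some iv =>
        rw [hiu, hiv] at h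
        simp only at h
        have hiu' : iu < n := pyIdxN_lt n u iu hiu
        have hiv' : iv < n := pyIdxN_lt n v iv hiv
        set adj1 := adj0.set iu (adj0.getD iu [] ++ [iv]) with hadj1
        set adj2 := adj1.set iv (adj1.getD iv [] ++ [iu]) with hadj2
        have hl1 : adj1.length = n := by rw [hadj1, len_set, hlen]
        have hl2 : adj2.length = n := by rw [hadj2, len_set, hl1]
        have hok1 : adjOK n adj1 := adjOK_set_append n adj0 hok iu iv hiv'
        have hok2 : adjOK n adj2 := adjOK_set_append n adj1 hok1 iv iu hiu'
        have ht1 : totL adj1 = totL adj0 + 1 := totL_set_append adj0 iu iv (by omega)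
        have ht2 : totL adj2 = totL adj1 + 1 := totL_set_append adj1 iv iu (by omega)
        obtain ⟨ha, hb, hc⟩ := ih adj2 adj h hl2 hok2
        refine ⟨ha, hb, ?_⟩
        rw [hc, ht2, ht1]
        simp [List.length_cons]
        ring


theorem final_eq (a : List Int) (edges : List (Int × Int))
    (hne : a ≠ [])
    (hedge : ∀ e ∈ edges,
      (-(a.length : Int) ≤ e.1 ∧ e.1 < (a.length : Int)) ∧
      (-(a.length : Int) ≤ e.2 ∧ e.2 < (a.length : Int))) :
    solution a edges = solution_alt a edges := by
  have hN1 : 1 ≤ a.length := List.length_pos_iff.mpr hne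
  obtain ⟨adj, hadj⟩ := buildAdj_some a.length edges (List.replicate a.length []) hedge
  obtain ⟨hlen, hok, htot0⟩ := buildAdj_props a.length edges (List.replicate a.length []) adj
    hadj (by simp) (by intro l hl x hx; rw [List.eq_of_mem_replicate hl] at hx; simp at hx)
  have htot : totL adj = 2 * edges.length := by
    rw [htot0]; simp [totL, List.map_replicate]
  -- visited array facts
  set vst1 := (List.replicate a.length false).set 0 true with hvst1
  have hv1len : vst1.length = a.length := by simp [hvst1]
  have hcrep : countF (List.replicate a.length false) = a.length := by
    simp [countF]
  have hg0 : (List.replicate a.length false).getD 0 false = false := by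
    rcases Nat.exists_eq_add_of_le hN1 with ⟨m, hm⟩
    rw [hm]; simp [List.replicate]
  have hcount : countF vst1 + 1 = a.length := by
    rw [hvst1]
    rw [countF_set_true _ 0 (by simp; omega) hg0, hcrep]
  -- the A side
  simp only [solution, hadj]
  rw [dfsA_eq_dfsP a.length adj 0 a (List.replicate a.length false)]
  -- unfold dfsP one step
  obtain ⟨M, hM⟩ : ∃ M, a.length = M + 1 := ⟨a.length - 1, by omega⟩
  have hdfsP : dfsP adj a.length 0 (List.replicate a.length false) [] =
      goP adj a.length (adj.getD 0 []) 0 vst1 [] := by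
    conv_lhs => rw [hM, dfsP]
    rw [← hM, ← hvst1]
    apply goP_fuel_ge a.length adj hok a.length M _ 0 _ [] (by omega) hv1len
      (getD_mem_lt a.length adj hok 0)
    omega
  rw [hdfsP]
  -- the B side
  simp only [solution_alt, hadj]
  have hkey := mrun_key a.length adj hok (a.length * (1 + 2 * edges.length)) 0 0 0 [] vst1 []
    hv1len (by omega) (by omega) (by intro fr hfr; simp at hfr)
    (by
      rw [phi_cons, htot]
      have hsl0 : slots adj ([] : List (Nat × Nat × Nat)) = 0 := by simp [slots]
      have hlv := getD_len_le_totL adj 0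
      rw [htot] at hlv
      have hNK : a.length * (1 + 2 * edges.length) =
          countF vst1 * (1 + 2 * edges.length) + (1 + 2 * edges.length) := by
        rw [← hcount]; ring
      simp only [List.length_nil]
      omega)
  rw [List.drop_zero] at hkey
  rw [hkey, mrun_nil]
  simp only [if_pos rfl]
  rfl


-- ===== VERDICT (by name: the statement is the Claim_ definition above) =====
theorem solution_spec : Claim_equal_solution := by
  intro a edges _ hpre
  show solution a edges = solution_alt a edges
  exact final_eq a edges hpre.1 hpre.2
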